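-- pv_equiv track=rewrite | github.com/inkedpad/MMM_Robyn_Pyspark | Robyn_pyspark_innerfolder/Codes/signals/candidate_narrowing.py | _rank_by_keywords
-- ===== SOURCE A (Python) =====
-- def _rank_by_keywords(metrics: list, keyword_groups: list) -> list:
--     """Pure Python. Unchanged from original."""
--
--     ranked        = []
--     metrics_lower = {m: m.lower() for m in metrics}
--
--     for group in keyword_groups:
--         for key in group:
--             for original, lowered in metrics_lower.items():
--                 if key in lowered and original not in ranked:
--                     ranked.append(original)
--
--     for m in metrics:
--         if m not in ranked:
--             ranked.append(m)
--
--     return ranked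
-- ===== SOURCE B (Python) =====
-- def _rank_by_keywords(metrics: list, keyword_groups: list) -> list:
--     keys = [k for g in keyword_groups for k in g]
--     uniq = list(dict.fromkeys(metrics))
--
--     def first_match(m):
--         low = m.lower()
--         for i, k in enumerate(keys):
--             if k in low:
--                 return i
--         return len(keys)
--
--     return sorted(uniq, key=first_match)
-- ===== Notes on version B (the rewrite author's own statement) =====
-- stated objective: faster
-- what changed: Replaces A's triple nested loop (every flattened key re-scans all dict items with an O(ranked) 'not in ranked' membership re-scan, then a final dedup pass) by deduplicating the metrics once and stable-sorting them on the index of the first flattened keyword that matches, with len(keys) as the no-match sentinel.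
import Mathlib
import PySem

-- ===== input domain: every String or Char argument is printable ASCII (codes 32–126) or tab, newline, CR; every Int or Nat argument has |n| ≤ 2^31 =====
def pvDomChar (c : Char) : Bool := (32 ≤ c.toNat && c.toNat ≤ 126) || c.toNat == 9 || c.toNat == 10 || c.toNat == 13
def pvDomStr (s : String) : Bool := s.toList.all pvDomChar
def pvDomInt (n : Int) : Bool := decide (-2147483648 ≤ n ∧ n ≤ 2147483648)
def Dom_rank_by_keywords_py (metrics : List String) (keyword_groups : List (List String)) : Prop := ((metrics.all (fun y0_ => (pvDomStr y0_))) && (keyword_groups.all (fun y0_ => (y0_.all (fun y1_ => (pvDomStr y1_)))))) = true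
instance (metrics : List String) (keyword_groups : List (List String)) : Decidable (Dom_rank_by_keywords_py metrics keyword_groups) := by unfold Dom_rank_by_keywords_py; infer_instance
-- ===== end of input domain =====

-- B replaces A's triple nested loop with its 'not in ranked' re-scans by one stable sort of the
-- deduplicated metrics keyed on the index of the first matching flattened keyword (objective: faster,
-- measured).

-- ===== PORT A =====
def rank_by_keywords_py (metrics : List String) (keyword_groups : List (List String)) : List String :=
  let metrics_lower : PySem.Dict String String :=
    metrics.foldl (fun d m => d.insert m (PySem.Str.lower m)) PySem.Dict.empty
  let ranked : List String :=
    keyword_groups.foldl (fun ranked group =>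
      group.foldl (fun ranked key =>
        metrics_lower.items.foldl (fun ranked p =>
          if PySem.Str.isIn key p.2 && !ranked.contains p.1 then ranked ++ [p.1] else ranked)
          ranked)
        ranked)
      []
  metrics.foldl (fun ranked m => if !ranked.contains m then ranked ++ [m] else ranked) ranked

-- ===== PORT B =====
-- Source B's 'for i, k in enumerate(keys): if k in low: return i' / 'return len(keys)'
def pvFirstMatch (keys : List String) (low : String) : Nat :=
  match keys with
  | [] => 0
  | k :: rest => if PySem.Str.isIn k low then 0 else pvFirstMatch rest low + 1

def rank_by_keywords_py_alt (metrics : List String) (keyword_groups : List (List String)) : List String :=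
  let keys := keyword_groups.flatten
  let uniq := PySem.List.dedup metrics
  PySem.List.sorted uniq (fun m => pvFirstMatch keys (PySem.Str.lower m)) false

-- ===== PRECONDITION & SPEC =====
def Spec_rank_by_keywords_py (metrics : List String) (keyword_groups : List (List String)) (out : List String) : Prop := out = rank_by_keywords_py_alt metrics keyword_groups
instance (metrics : List String) (keyword_groups : List (List String)) (out : List String) : Decidable (Spec_rank_by_keywords_py metrics keyword_groups out) := by unfold Spec_rank_by_keywords_py; infer_instance

-- ===== CLAIM (what is proved, stated in full; the proofs are below) =====
def Claim_equal_rank_by_keywords_py : Prop := ∀ (metrics : List String) (keyword_groups : List (List String)), Dom_rank_by_keywords_py metrics keyword_groups → Spec_rank_by_keywords_py metrics keyword_groups (rank_by_keywords_py metrics keyword_groups)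

-- ===== LEMMAS AND PROOFS =====

-- ---- first-match index: basic facts ----
theorem pvFirstMatch_cons (k : String) (rest : List String) (low : String) :
    pvFirstMatch (k :: rest) low =
      if PySem.Str.isIn k low then 0 else pvFirstMatch rest low + 1 := rfl

theorem pvFirstMatch_le (keys : List String) (low : String) : pvFirstMatch keys low ≤ keys.length := by
  induction keys with
  | nil => simp [pvFirstMatch]
  | cons k rest ih =>
    rw [pvFirstMatch_cons, List.length_cons]
    split <;> omega

theorem pvFirstMatch_append (P S : List String) (low : String) :
    pvFirstMatch (P ++ S) low =
      if pvFirstMatch P low < P.length then pvFirstMatch P low else P.length + pvFirstMatch S low := by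
  induction P with
  | nil => simp [pvFirstMatch]
  | cons k rest ih =>
    rw [List.cons_append, pvFirstMatch_cons, pvFirstMatch_cons, List.length_cons]
    by_cases h : PySem.Str.isIn k low = true
    · rw [if_pos h, if_pos h]
      simp
    · rw [if_neg h, if_neg h, ih]
      have := pvFirstMatch_le rest low
      split_ifs <;> omega

-- ---- the bucket view: deduped metrics with first-match index i, for i < t, in dedup order ----
def pvBuckets (keys : List String) (uniq : List String) (t : Nat) : List String :=
  (List.range t).flatMap (fun i => uniq.filter (fun m => pvFirstMatch keys (PySem.Str.lower m) = i))

theorem mem_pvBuckets (keys uniq : List String) (t : Nat) (m : String) :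
    m ∈ pvBuckets keys uniq t ↔ m ∈ uniq ∧ pvFirstMatch keys (PySem.Str.lower m) < t := by
  simp only [pvBuckets, List.mem_flatMap, List.mem_range, List.mem_filter, decide_eq_true_eq]
  constructor
  · rintro ⟨i, hi, hm, he⟩; exact ⟨hm, he ▸ hi⟩
  · rintro ⟨hm, hlt⟩; exact ⟨_, hlt, hm, rfl⟩

theorem contains_pvBuckets (keys uniq : List String) (t : Nat) (m : String) (hm : m ∈ uniq) :
    (pvBuckets keys uniq t).contains m = decide (pvFirstMatch keys (PySem.Str.lower m) < t) := by
  by_cases h : pvFirstMatch keys (PySem.Str.lower m) < t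
  · simp only [h, decide_true]
    exact List.contains_iff_mem.mpr ((mem_pvBuckets keys uniq t m).2 ⟨hm, h⟩)
  · simp only [h, decide_false]
    rw [Bool.eq_false_iff]
    intro hc
    exact h ((mem_pvBuckets keys uniq t m).1 (List.contains_iff_mem.mp hc)).2

-- ---- stable insertion into a concatenation of key-homogeneous buckets ----
theorem insertBy_all_before {α : Type} (b : α → α → Bool) (x : α) (S : List α)
    (h : ∀ y ∈ S, b x y = true) : PySem.List.insertBy b x S = x :: S := by
  cases S with
  | nil => rfl
  | cons y ys => simp [PySem.List.insertBy, h y List.mem_cons_self]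

theorem insertBy_append_skip {α : Type} (b : α → α → Bool) (x : α) (P S : List α)
    (h : ∀ y ∈ P, b x y = false) :
    PySem.List.insertBy b x (P ++ S) = P ++ PySem.List.insertBy b x S := by
  induction P with
  | nil => simp
  | cons y P ih =>
    have hy := h y List.mem_cons_self
    have ihP := ih (fun w hw => h w (List.mem_cons_of_mem _ hw))
    cases S with
    | nil =>
      rw [List.append_nil, PySem.List.insertBy_of_forall_not_before b x (y :: P) h]
      rfl
    | cons z S =>
      simp only [List.cons_append, PySem.List.insertBy, hy, Bool.false_eq_true, if_false]
      cases P <;> simp_all [PySem.List.insertBy]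

theorem insertBy_flat {α : Type} (f : α → Nat) (x : α) :
    ∀ (n s : Nat) (g : Nat → List α),
    (∀ i ∈ List.range' s n, ∀ y ∈ g i, f y = i) → s ≤ f x → f x < s + n →
    PySem.List.insertBy (fun a b => decide (f a < f b)) x ((List.range' s n).flatMap g) =
      (List.range' s n).flatMap (fun i => g i ++ if f x = i then [x] else []) := by
  intro n
  induction n with
  | zero => intro s g _ h1 h2; omega
  | succ n ih =>
    intro s g hg h1 h2
    rw [List.range'_succ, List.flatMap_cons, List.flatMap_cons]
    by_cases hjs : f x = s
    · rw [insertBy_append_skip _ _ _ _ (by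
        intro y hy
        have := hg s List.mem_cons_self y hy
        simp [this, hjs]),
        insertBy_all_before _ _ _ (by
        intro y hy
        simp only [List.mem_flatMap] at hy
        obtain ⟨i, hi, hyi⟩ := hy
        have hfy := hg i (List.mem_cons_of_mem _ hi) y hyi
        have := List.mem_range'_1.mp hi
        simp only [decide_eq_true_eq]
        omega)]
      have hrest : (List.range' (s+1) n).flatMap (fun i => g i ++ if f x = i then [x] else [])
          = (List.range' (s+1) n).flatMap g := by
        apply List.flatMap_congr
        intro i hi
        have := List.mem_range'_1.mp hi
        have : f x ≠ i := by omega
        simp [this]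
      rw [hrest, if_pos hjs, List.append_assoc]
      rfl
    · rw [insertBy_append_skip _ _ _ _ (by
        intro y hy
        have := hg s List.mem_cons_self y hy
        simp only [this, decide_eq_false_iff_not]
        omega),
        ih (s+1) g (fun i hi => hg i (List.mem_cons_of_mem _ hi)) (by omega) (by omega),
        if_neg hjs, List.append_nil]

-- ---- Python's stable sort by a bounded Nat key IS the concatenation of the buckets ----
theorem sorted_eq_flatMap {α : Type} (f : α → Nat) (K : Nat) (xs : List α)
    (h : ∀ y ∈ xs, f y ≤ K) :
    PySem.List.sorted xs f false =
      (List.range (K+1)).flatMap (fun i => xs.filter (fun y => f y = i)) := by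
  induction xs using List.reverseRecOn with
  | nil => simp [PySem.List.sorted_eq_foldl_insertBy]
  | append_singleton ys x ih =>
    rw [PySem.List.sorted_eq_foldl_insertBy, List.foldl_append, List.foldl_cons, List.foldl_nil,
      ← PySem.List.sorted_eq_foldl_insertBy,
      ih (fun y hy => h y (List.mem_append_left _ hy)),
      List.range_eq_range',
      insertBy_flat f x (K+1) 0 _
        (by intro i _ y hy
            simp only [List.mem_filter, decide_eq_true_eq] at hy
            exact hy.2)
        (Nat.zero_le _)
        (by have := h x (List.mem_append_right _ List.mem_cons_self); omega)]
    apply List.flatMap_congr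
    intro i _
    rw [List.filter_append]
    congr 1
    by_cases hfx : f x = i <;> simp [hfx]

-- ---- the dict comprehension: items are the deduped metrics paired with their lowercase ----
theorem lowerDict_items :
    ∀ (ms : List String) (s : List String) (d : PySem.Dict String String),
    d.items = s.map (fun m => (m, PySem.Str.lower m)) →
    (ms.foldl (fun d m => d.insert m (PySem.Str.lower m)) d).items
      = (ms.foldl PySem.Set.add s).map (fun m => (m, PySem.Str.lower m)) := by
  intro ms
  induction ms with
  | nil => intro s d h; simpa using h
  | cons m ms ih =>
    intro s d h
    have hkeys : d.keys = s := by
      simp [PySem.Dict.keys, h, List.map_map, Function.comp_def]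
    simp only [List.foldl_cons]
    by_cases hc : m ∈ s
    · have hdc : d.contains m = true := by
        rw [PySem.Dict.contains_eq_decide_mem_keys, hkeys]; simp [hc]
      apply ih
      rw [PySem.Dict.items_insert_of_contains d _ hdc, h, List.map_map]
      have hadd : PySem.Set.add s m = s := by simp [PySem.Set.add, hc]
      rw [hadd]
      apply List.map_congr_left
      intro a _
      by_cases ha : a = m
      · subst ha; simp
      · simp [Function.comp, ha]
    · have hdc : d.contains m = false := by
        rw [PySem.Dict.contains_eq_decide_mem_keys, hkeys]; simp [hc]
      apply ih
      rw [PySem.Dict.items_insert_of_not_contains d _ hdc, h]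
      have hadd : PySem.Set.add s m = s ++ [m] := by simp [PySem.Set.add, hc]
      rw [hadd]
      simp

-- ---- one key's pass over the (deduped) metrics appends the new matches, in order ----
theorem inner_fold (q : String → Bool) :
    ∀ (us : List String), us.Nodup → ∀ (r0 : List String),
    us.foldl (fun r m => if q m && !r.contains m then r ++ [m] else r) r0
      = r0 ++ us.filter (fun m => q m && !r0.contains m) := by
  intro us
  induction us with
  | nil => intro _ r0; simp
  | cons m ms ih =>
    intro hnd r0
    have hnd' := (List.nodup_cons.mp hnd).2
    have hm := (List.nodup_cons.mp hnd).1
    rw [List.foldl_cons, List.filter_cons]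
    by_cases hq : (q m && !r0.contains m) = true
    · rw [if_pos hq, if_pos hq, ih hnd' (r0 ++ [m]), List.append_assoc, List.singleton_append]
      congr 2
      apply List.filter_congr
      intro a ha
      have hne : a ≠ m := fun he => hm (he ▸ ha)
      have : (r0 ++ [m]).contains a = r0.contains a := by
        by_cases hmem : a ∈ r0
        · rw [List.contains_iff_mem.mpr (List.mem_append_left _ hmem),
            List.contains_iff_mem.mpr hmem]
        · have h1 : ¬ a ∈ r0 ++ [m] := by simp [hmem, hne]
          rw [Bool.eq_false_iff.mpr (fun hx => h1 (List.contains_iff_mem.mp hx)),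
            Bool.eq_false_iff.mpr (fun hx => hmem (List.contains_iff_mem.mp hx))]
      rw [this]
    · rw [if_neg hq, if_neg hq, ih hnd' r0]

-- ---- the double keyword loop fills the buckets left to right ----
theorem key_loop (keys uniq : List String) (hu : uniq.Nodup) :
    ∀ (S P : List String), keys = P ++ S →
    S.foldl (fun r key => uniq.foldl (fun r m =>
        if PySem.Str.isIn key (PySem.Str.lower m) && !r.contains m then r ++ [m] else r) r)
      (pvBuckets keys uniq P.length)
    = pvBuckets keys uniq keys.length := by
  intro S
  induction S with
  | nil => intro P h; rw [List.foldl_nil, h, List.append_nil]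
  | cons key S ih =>
    intro P h
    simp only [List.foldl_cons]
    rw [inner_fold _ uniq hu]
    have hstep : pvBuckets keys uniq P.length
        ++ uniq.filter (fun m => PySem.Str.isIn key (PySem.Str.lower m)
              && !(pvBuckets keys uniq P.length).contains m)
        = pvBuckets keys uniq (P.length + 1) := by
      have : pvBuckets keys uniq (P.length + 1)
          = pvBuckets keys uniq P.length
            ++ uniq.filter (fun m => pvFirstMatch keys (PySem.Str.lower m) = P.length) := by
        simp only [pvBuckets]
        rw [List.range_succ, List.flatMap_append, List.flatMap_cons, List.flatMap_nil,
          List.append_nil]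
      rw [this]
      congr 1
      apply List.filter_congr
      intro m hm
      rw [contains_pvBuckets keys uniq P.length m hm]
      have hfm := pvFirstMatch_append P (key :: S) (PySem.Str.lower m)
      rw [← h] at hfm
      have hPle := pvFirstMatch_le P (PySem.Str.lower m)
      by_cases hin : PySem.Str.isIn key (PySem.Str.lower m) = true
      · have hin2 : PySem.Chars.isIn key.toList (PySem.Chars.lower m.toList) = true := by
          simpa using hin
        have h0 : pvFirstMatch (key :: S) (PySem.Str.lower m) = 0 := by
          rw [pvFirstMatch_cons, if_pos hin]
        by_cases hlt : pvFirstMatch P (PySem.Str.lower m) < P.length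
        · have hk : pvFirstMatch keys (PySem.Str.lower m) < P.length := by
            rw [hfm, if_pos hlt]; exact hlt
          simp [hin2, hk, Nat.ne_of_lt hk]
        · have hk : pvFirstMatch keys (PySem.Str.lower m) = P.length := by
            rw [hfm, if_neg hlt, h0]
            omega
          simp [hin2, hk]
      · have hin2 : PySem.Chars.isIn key.toList (PySem.Chars.lower m.toList) = false := by
          simpa using hin
        have h0 : pvFirstMatch (key :: S) (PySem.Str.lower m) ≠ 0 := by
          rw [pvFirstMatch_cons, if_neg hin]
          omega
        have hk : pvFirstMatch keys (PySem.Str.lower m) ≠ P.length := by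
          rw [hfm]
          split <;> omega
        simp [hin2, hk]
    rw [hstep]
    have hlen : P.length + 1 = (P ++ [key]).length := by simp
    rw [hlen]
    exact ih (P ++ [key]) (by rw [h]; simp)

-- ---- the final dedup-append loop ----
theorem final_fold (ms : List String) :
    ∀ (r0 : List String),
    ms.foldl (fun r m => if !r.contains m then r ++ [m] else r) r0
      = r0 ++ (PySem.List.dedup ms).filter (fun m => !r0.contains m) := by
  intro r0
  have hfun : (fun (r : List String) m => if !r.contains m then r ++ [m] else r)
      = PySem.Set.add := by
    funext r m
    simp only [PySem.Set.add]
    cases h : PySem.Set.contains r m <;> simp_all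
  rw [hfun]
  have h2 : ms.foldl PySem.Set.add r0 = PySem.Set.update r0 ms := rfl
  rw [h2, PySem.Set.update_eq_append_filter, PySem.List.dedup_eq_ofList]
  simp

-- ===== VERDICT (by name: the statement is the Claim_ definition above) =====
theorem rank_by_keywords_py_spec : Claim_equal_rank_by_keywords_py := by
  intro metrics keyword_groups _
  unfold Spec_rank_by_keywords_py rank_by_keywords_py rank_by_keywords_py_alt
  simp only []
  set keys := keyword_groups.flatten with hkeys
  set uniq := PySem.List.dedup metrics with huniq
  have hu : uniq.Nodup := PySem.List.nodup_dedup metrics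
  -- the dict comprehension's items
  have hitems : (metrics.foldl (fun d m => d.insert m (PySem.Str.lower m)) PySem.Dict.empty).items
      = uniq.map (fun m => (m, PySem.Str.lower m)) := by
    rw [lowerDict_items metrics [] PySem.Dict.empty (by rfl), huniq,
      PySem.List.dedup_eq_ofList, PySem.Set.ofList_eq_foldl]
  rw [hitems]
  -- the double group/key loop is a loop over the flattened keys
  rw [← List.foldl_flatten, ← hkeys]
  -- the innermost loop over items is a loop over uniq
  simp only [List.foldl_map]
  -- run the keyword loop
  have h0 : pvBuckets keys uniq 0 = [] := by simp [pvBuckets]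
  have hloop := key_loop keys uniq hu keys [] rfl
  simp only [List.length_nil] at hloop
  rw [h0] at hloop
  rw [hloop]
  -- run the final loop
  rw [final_fold metrics (pvBuckets keys uniq keys.length), ← huniq]
  -- assemble the buckets and compare with the stable sort
  rw [sorted_eq_flatMap (fun m => pvFirstMatch keys (PySem.Str.lower m)) keys.length uniq
      (fun y _ => pvFirstMatch_le keys (PySem.Str.lower y))]
  have : (List.range (keys.length + 1)).flatMap
      (fun i => uniq.filter (fun y => pvFirstMatch keys (PySem.Str.lower y) = i))
      = pvBuckets keys uniq keys.length
        ++ uniq.filter (fun m => pvFirstMatch keys (PySem.Str.lower m) = keys.length) := by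
    simp only [pvBuckets]
    rw [List.range_succ, List.flatMap_append, List.flatMap_cons, List.flatMap_nil, List.append_nil]
  rw [this]
  congr 1
  apply List.filter_congr
  intro m hm
  rw [contains_pvBuckets keys uniq keys.length m hm]
  have := pvFirstMatch_le keys (PySem.Str.lower m)
  by_cases h : pvFirstMatch keys (PySem.Str.lower m) = keys.length
  · simp [h]
  · have : pvFirstMatch keys (PySem.Str.lower m) < keys.length := by omega
    simp [h, this]
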